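-- pv_equiv track=rewrite | github.com/kres0345/Ace-Encoding | huffman_header.py | create_hoffman_dict
-- ===== SOURCE A (Python) =====
-- from operator import itemgetter
--
-- def create_hoffman_dict(text):
--     """
--     Input text is a string containing the text you want to encode.
--     """
--     chars = []
--     combochars = []
--
--     for i in range(len(text)):
--         if not text[i] in chars:
--             chars.append(text[i])
--
--
--     for i in range(len(chars)):
--         for y in range(len(chars)):
--             charcombo = chars[i] + chars[y]
--             charcount = text.count(charcombo)
--             combochars.append({"char": charcombo, "count": charcount})
--
--     combochars = sorted(combochars, key=itemgetter('count'),reverse=True)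
--
--     combochars_new = []
--
--     for i in range(len(combochars)):
--         combochars_new.append(combochars[i]['char'])
--     combochars = combochars_new
--
--     dictionary = {}
--
--     for i in range(len(combochars)):
--         dictionary[combochars[i]] = chr(i)#+97 # Previusly I started building from 97
--                                         #But then I'ld just skip 97 1 byte chars.
--
--     return dictionary
-- ===== SOURCE B (Python) =====
-- def create_hoffman_dict(text):
--     """
--     Input text is a string containing the text you want to encode.
--     """
--     # distinct characters in first-appearance order
--     chars = list(dict.fromkeys(text))
--
--     # One pass over text: decompose into maximal runs of equal characters.
--     # A run of c of length L contributes L // 2 non-overlapping occurrences of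
--     # c+c; each boundary between two runs contributes one occurrence of the
--     # two-character string across it.  This reproduces str.count for every
--     # two-character combo.
--     counts = {}
--     n = len(text)
--     i = 0
--     while i < n:
--         c = text[i]
--         j = i + 1
--         while j < n and text[j] == c:
--             j += 1
--         run = j - i
--         counts[c + c] = counts.get(c + c, 0) + run // 2
--         if j < n:
--             pair = c + text[j]
--             counts[pair] = counts.get(pair, 0) + 1
--         i = j
--
--     combos = [(a + b, counts.get(a + b, 0)) for a in chars for b in chars]
--     combos = sorted(combos, key=lambda t: t[1], reverse=True)
--     return {pair: chr(i) for i, (pair, _) in enumerate(combos)}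
-- ===== Notes on version B (the rewrite author's own statement) =====
-- stated objective: alternative
-- what changed: Instead of calling text.count for each of the k^2 character combos (each a full scan of text), B makes one pass over text decomposing it into maximal runs of equal characters (run//2 occurrences of c+c per run, one occurrence per run boundary) into a dict, then looks each combo up; the stable reverse sort and chr(i) dict build are unchanged. Fewer asymptotic scans, but A's scans run in C while B's pass is Python-level, so B is not measurably faster.
import Mathlib
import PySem

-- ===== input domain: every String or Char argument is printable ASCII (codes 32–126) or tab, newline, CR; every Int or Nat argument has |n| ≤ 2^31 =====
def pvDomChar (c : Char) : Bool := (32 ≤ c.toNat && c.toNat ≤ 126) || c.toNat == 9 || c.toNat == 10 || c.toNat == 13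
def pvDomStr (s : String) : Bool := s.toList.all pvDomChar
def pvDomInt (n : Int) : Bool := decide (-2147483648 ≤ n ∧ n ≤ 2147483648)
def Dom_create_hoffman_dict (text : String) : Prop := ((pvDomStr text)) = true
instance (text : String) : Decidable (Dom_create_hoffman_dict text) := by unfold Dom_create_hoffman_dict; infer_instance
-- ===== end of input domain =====

-- B replaces A's per-combo text.count scans with one pass over text counting runs of equal
-- characters and run boundaries into a dict (a different algorithm; not measured faster).
-- Python's chr(i) is ported as Char.ofNat; exact here since i < (number of combos) ≤ 99^2 < 0xD800.

-- ===== PORT A =====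
-- A's chars is a list of the 1-character strings text[i]; modelled as List Char.
-- A's {"char": …, "count": …} dicts have two fixed distinct keys; modelled as the pair
-- (char, count), so itemgetter('count') is Prod.snd. Exact: only those two keys are ever read.
def create_hoffman_dict (text : String) : List (String × String) :=
  let chars : List Char :=
    text.toList.foldl (fun acc c => if acc.contains c then acc else acc ++ [c]) []
  let combochars : List (String × Int) :=
    chars.foldl (fun acc a =>
      chars.foldl (fun acc2 b =>
        acc2 ++ [(String.ofList [a, b], (PySem.Str.count text (String.ofList [a, b]) : Int))]) acc) []
  let combochars2 := PySem.List.sorted combochars (fun p => p.2) true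
  let combochars_new : List String := combochars2.foldl (fun acc p => acc ++ [p.1]) []
  let dictionary : PySem.Dict String String :=
    (PySem.List.pyRange 0 (combochars_new.length : Int) 1).foldl
      (fun d i => d.insert (PySem.List.pyGetD combochars_new i "") (String.ofList [Char.ofNat i.toNat]))
      PySem.Dict.empty
  dictionary.items

-- ===== PORT B =====
-- Source B's while-loop over maximal runs of equal characters: a run of c of length `run` adds
-- run // 2 to counts[c+c]; a boundary between two runs adds 1 to counts[c + next char].
def pvCountRuns : List Char → PySem.Dict String Int → PySem.Dict String Int
  | [], counts => counts
  | c :: rest, counts =>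
    let run : Nat := (rest.takeWhile (fun x => x == c)).length + 1
    let cc := String.ofList [c, c]
    let counts1 := counts.insert cc (counts.getD cc 0 + (run / 2 : Nat))
    match h : rest.dropWhile (fun x => x == c) with
    | [] => counts1
    | c' :: tl =>
      let pair := String.ofList [c, c']
      pvCountRuns (c' :: tl) (counts1.insert pair (counts1.getD pair 0 + 1))
  termination_by l _ => l.length
  decreasing_by
    simp only [List.length_cons]
    have := List.length_dropWhile_le (p := fun x => x == c) (l := rest)
    rw [h] at this
    simpa using Nat.lt_succ_of_le this

def create_hoffman_dict_alt (text : String) : List (String × String) :=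
  let chars : List Char := PySem.List.dedup text.toList
  let counts := pvCountRuns text.toList PySem.Dict.empty
  let combos : List (String × Int) :=
    chars.flatMap (fun a => chars.map (fun b =>
      (String.ofList [a, b], counts.getD (String.ofList [a, b]) 0)))
  let combos2 := PySem.List.sorted combos (fun t => t.2) true
  ((PySem.List.enumerate combos2).foldl
      (fun d p => d.insert p.2.1 (String.ofList [Char.ofNat p.1.toNat])) PySem.Dict.empty).items

-- ===== PRECONDITION & SPEC =====
def Spec_create_hoffman_dict (text : String) (out : List (String × String)) : Prop := out = create_hoffman_dict_alt text
instance (text : String) (out : List (String × String)) : Decidable (Spec_create_hoffman_dict text out) := by unfold Spec_create_hoffman_dict; infer_instance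

-- ===== CLAIM (what is proved, stated in full; the proofs are below) =====
def Claim_equal_create_hoffman_dict : Prop := ∀ (text : String), Dom_create_hoffman_dict text → Spec_create_hoffman_dict text (create_hoffman_dict text)

-- ===== LEMMAS AND PROOFS =====

-- Greedy non-overlapping count of the two-character pattern [a, b] (what str.count computes).
def pvGreedy2 (a b : Char) : List Char → Nat
  | [] => 0
  | [_] => 0
  | x :: y :: rest => if x = a ∧ y = b then 1 + pvGreedy2 a b rest else pvGreedy2 a b (y :: rest)

-- Contribution of the boundary between a run of c and the rest tl to the count of [a, b].
def pvBdry (a b c : Char) : List Char → Nat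
  | [] => 0
  | c' :: _ => if a = c ∧ b = c' then 1 else 0

lemma pvGreedy2_skip {a : Char} (b x : Char) (t : List Char) (hx : x ≠ a) :
    pvGreedy2 a b (x :: t) = pvGreedy2 a b t := by
  cases t with
  | nil => simp [pvGreedy2]
  | cons y r =>
    simp only [pvGreedy2]
    rw [if_neg (fun h => hx h.1)]

lemma pvCount_go_eq (a b : Char) :
    ∀ (fuel : Nat) (l : List Char) (acc : Nat), l.length ≤ fuel →
      PySem.Chars.count.go [a, b] fuel l acc = acc + pvGreedy2 a b l := by
  intro fuel
  induction fuel with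
  | zero =>
    intro l acc h
    have : l = [] := List.eq_nil_of_length_eq_zero (Nat.le_zero.mp h)
    subst this
    simp [PySem.Chars.count.go, pvGreedy2]
  | succ f ih =>
    intro l acc h
    match l with
    | [] => simp [PySem.Chars.count.go, pvGreedy2]
    | [x] =>
      simp only [PySem.Chars.count.go, List.isPrefixOf, pvGreedy2]
      simp only [Bool.and_eq_true, beq_iff_eq]
      simpa [pvGreedy2] using ih [] acc (Nat.zero_le f)
    | x :: y :: r =>
      rw [PySem.Chars.count.go]
      by_cases hab : a = x ∧ b = y
      · have hpre : [a, b].isPrefixOf (x :: y :: r) = true := by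
          simp [List.isPrefixOf, hab.1, hab.2]
        rw [if_pos hpre]
        simp only [List.length_cons] at h
        have hr : r.length ≤ f := by omega
        have := ih r (acc + 1) hr
        simp only [List.length_cons, List.length_nil, List.drop_succ_cons, List.drop_zero]
        rw [this]
        simp [pvGreedy2, hab.1.symm, hab.2.symm]
        omega
      · have hpre : [a, b].isPrefixOf (x :: y :: r) = false := by
          simp [List.isPrefixOf]
          intro h1 h2; exact absurd ⟨h1, h2⟩ hab
        rw [if_neg (by simp [hpre])]
        simp only [List.length_cons] at h
        have := ih (y :: r) acc (by simp; omega)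
        rw [this]
        have : ¬ (x = a ∧ y = b) := fun hc => hab ⟨hc.1.symm, hc.2.symm⟩
        simp [pvGreedy2, this]

lemma pvCount_pair (a b : Char) (l : List Char) :
    PySem.Chars.count l [a, b] = pvGreedy2 a b l := by
  rw [PySem.Chars.count]
  simp only [List.isEmpty_cons, if_false, Bool.false_eq_true]
  simpa using pvCount_go_eq a b l.length l 0 le_rfl

-- A run of k ≥ 1 copies of c followed by tl whose head differs from c.
lemma pvGreedy2_run (a b c : Char) (k : Nat) (hk : 1 ≤ k) (tl : List Char)
    (htl : ∀ x ∈ tl.head?, x ≠ c) :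
    pvGreedy2 a b (List.replicate k c ++ tl) =
      (if a = c ∧ b = c then k / 2 else 0) + pvBdry a b c tl + pvGreedy2 a b tl := by
  induction k using Nat.strong_induction_on with
  | _ k ih =>
  match k, hk with
  | 1, _ =>
    cases tl with
    | nil => simp [pvGreedy2, pvBdry]
    | cons c' tl2 =>
      have hc' : c' ≠ c := htl c' (by simp)
      simp only [List.replicate_one, List.singleton_append, pvBdry]
      by_cases hab : a = c ∧ b = c'
      · have hca : c = a ∧ c' = b := ⟨hab.1.symm, hab.2.symm⟩
        simp only [pvGreedy2, if_pos hca, if_pos hab]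
        have hskip : pvGreedy2 a b (c' :: tl2) = pvGreedy2 a b tl2 :=
          pvGreedy2_skip b c' tl2 (hab.1 ▸ hc')
        rw [hskip, if_neg (fun h : a = c ∧ b = c => hc' (hab.2.symm.trans h.2))]
      · simp only [pvGreedy2]
        rw [if_neg (fun h : c = a ∧ c' = b => hab ⟨h.1.symm, h.2.symm⟩), if_neg hab]
        have : (if a = c ∧ b = c then 1 / 2 else 0) = 0 := by split <;> omega
        omega
  | (m+2), _ =>
    have hrep : List.replicate (m+2) c ++ tl = c :: c :: (List.replicate m c ++ tl) := by
      simp [List.replicate_succ]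
    rw [hrep]
    have hbdry0 : pvBdry a b c tl = 0 ∨ ¬ (a = c ∧ b = c) := by
      by_cases hab : a = c ∧ b = c
      · left
        cases tl with
        | nil => rfl
        | cons c' tl2 =>
          have hc' : c' ≠ c := htl c' (by simp)
          simp only [pvBdry]
          rw [if_neg (fun h : a = c ∧ b = c' => hc' (h.2.symm.trans hab.2))]
      · right; exact hab
    by_cases hab : a = c ∧ b = c
    · have hca : c = a ∧ c = b := ⟨hab.1.symm, hab.2.symm⟩
      simp only [pvGreedy2, if_pos hca]
      have hb0 : pvBdry a b c tl = 0 := hbdry0.resolve_right (fun h => h hab)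
      cases m with
      | zero =>
        simp only [List.replicate_zero, List.nil_append]
        rw [hb0, if_pos hab]
      | succ m' =>
        rw [ih (m'+1) (by omega) (by omega), hb0, if_pos hab, if_pos hab]
        omega
    · simp only [pvGreedy2]
      rw [if_neg (fun h : c = a ∧ c = b => hab ⟨h.1.symm, h.2.symm⟩)]
      have h1 : c :: (List.replicate m c ++ tl) = List.replicate (m+1) c ++ tl := by
        simp [List.replicate_succ]
      rw [h1, ih (m+1) (by omega) (by omega), if_neg hab, if_neg hab]

lemma pvTakeWhile_replicate (c : Char) (rest : List Char) :
    rest.takeWhile (fun x => x == c) = List.replicate (rest.takeWhile (fun x => x == c)).length c := by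
  rw [List.eq_replicate_iff]
  refine ⟨rfl, fun x hx => ?_⟩
  have := List.mem_takeWhile_imp hx
  simpa using this

lemma pvRunDecomp (c : Char) (rest : List Char) :
    c :: rest = List.replicate ((rest.takeWhile (fun x => x == c)).length + 1) c
                  ++ rest.dropWhile (fun x => x == c) := by
  conv_lhs => rw [← List.takeWhile_append_dropWhile (p := fun x => x == c) (l := rest)]
  rw [List.replicate_succ, List.cons_append]
  conv_rhs => rw [← pvTakeWhile_replicate c rest]

lemma pvCountRuns_getD (a b : Char) :
    ∀ (l : List Char) (d : PySem.Dict String Int),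
      (pvCountRuns l d).getD (String.ofList [a, b]) 0 =
        d.getD (String.ofList [a, b]) 0 + (pvGreedy2 a b l : Int) := by
  intro l d
  induction l, d using pvCountRuns.induct with
  | case1 d => simp [pvCountRuns, pvGreedy2]
  | case2 c rest d h =>
    rw [pvCountRuns.eq_2]
    split
    next heq =>
      have hg : pvGreedy2 a b (c :: rest) =
          (if a = c ∧ b = c then ((rest.takeWhile (fun x => x == c)).length + 1) / 2 else 0) := by
        rw [pvRunDecomp c rest, h,
          pvGreedy2_run a b c ((rest.takeWhile (fun x => x == c)).length + 1) (by omega) [] (by simp)]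
        simp [pvBdry, pvGreedy2]
      rw [PySem.Dict.getD_insert, hg]
      by_cases hac : a = c ∧ b = c
      · obtain ⟨rfl, rfl⟩ := hac
        rw [if_pos rfl, if_pos ⟨rfl, rfl⟩]
      · rw [if_neg (fun he => hac (by simpa using (String.ofList_inj.mp he))), if_neg hac]
        simp
    next c2 tl2 heq =>
      rw [h] at heq; cases heq
  | case3 c rest d run cc counts1 c' tl hdw pair ih =>
    rw [pvCountRuns.eq_2]
    split
    next heq => rw [hdw] at heq; cases heq
    next c2 tl2 heq =>
      rw [hdw] at heq
      cases heq
      have hw : rest.dropWhile (fun x => x == c) ≠ [] := by rw [hdw]; simp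
      have hc'f := List.head_dropWhile_not (fun x => x == c) hw
      have hhead : (rest.dropWhile (fun x => x == c)).head hw = c' := by simp [hdw]
      rw [hhead] at hc'f
      have hc' : c' ≠ c := by simpa using hc'f
      have hg : pvGreedy2 a b (c :: rest) =
          (if a = c ∧ b = c then ((rest.takeWhile (fun x => x == c)).length + 1) / 2 else 0) +
          (if a = c ∧ b = c' then 1 else 0) + pvGreedy2 a b (c' :: tl) := by
        rw [pvRunDecomp c rest, hdw,
          pvGreedy2_run a b c ((rest.takeWhile (fun x => x == c)).length + 1) (by omega) (c' :: tl)
            (by intro x hx; simp at hx; subst hx; exact hc')]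
        simp [pvBdry]
      simp only [pair, counts1, cc, run] at ih ⊢
      rw [ih, hg]
      simp only [PySem.Dict.getD_insert, String.ofList_inj, List.cons.injEq, and_true]
      by_cases h2 : a = c ∧ b = c'
      · have hB : ¬ (a = c ∧ b = c) := fun hB => hc' (h2.2.symm.trans hB.2)
        rw [if_pos h2, if_neg (by simp [hc'] : ¬ (True ∧ c' = c)), if_neg hB, if_pos h2,
          show String.ofList [a, b] = String.ofList [c, c'] from by rw [h2.1, h2.2]]
        push_cast
        omega
      · by_cases h1 : a = c ∧ b = c
        · rw [if_neg h2, if_pos h1, if_pos h1, if_neg h2,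
            show String.ofList [a, b] = String.ofList [c, c] from by rw [h1.1, h1.2]]
          push_cast
          omega
        · rw [if_neg h2, if_neg h1, if_neg h1, if_neg h2]
          simp

lemma pvCounts_eq (text : String) (a b : Char) :
    (pvCountRuns text.toList PySem.Dict.empty).getD (String.ofList [a, b]) 0 =
      (PySem.Str.count text (String.ofList [a, b]) : Int) := by
  rw [pvCountRuns_getD]
  have : PySem.Str.count text (String.ofList [a, b]) = PySem.Chars.count text.toList [a, b] := by
    simp [PySem.Str.count]
  rw [this, pvCount_pair]
  simp [PySem.Dict.getD_empty]

-- ===== VERDICT (by name: the statement is the Claim_ definition above) =====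
theorem create_hoffman_dict_spec : Claim_equal_create_hoffman_dict := by
  intro text _
  show create_hoffman_dict text = create_hoffman_dict_alt text
  unfold create_hoffman_dict create_hoffman_dict_alt
  simp only [PySem.List.foldl_append_singleton_eq_map, PySem.List.foldl_append_eq_flatMap,
    List.nil_append]
  have hchars : text.toList.foldl (fun acc c => if acc.contains c then acc else acc ++ [c]) [] =
      PySem.List.dedup text.toList := rfl
  rw [hchars]
  have hcombos :
      (PySem.List.dedup text.toList).flatMap (fun a => (PySem.List.dedup text.toList).map (fun b =>
        (String.ofList [a, b], (PySem.Str.count text (String.ofList [a, b]) : Int)))) =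
      (PySem.List.dedup text.toList).flatMap (fun a => (PySem.List.dedup text.toList).map (fun b =>
        (String.ofList [a, b],
          (pvCountRuns text.toList PySem.Dict.empty).getD (String.ofList [a, b]) 0))) := by
    simp only [pvCounts_eq]
  rw [hcombos]
  set L := PySem.List.sorted
    ((PySem.List.dedup text.toList).flatMap (fun a => (PySem.List.dedup text.toList).map (fun b =>
      (String.ofList [a, b],
        (pvCountRuns text.toList PySem.Dict.empty).getD (String.ofList [a, b]) 0))))
    (fun p => p.2) true with hL
  rw [PySem.List.enumerate_eq_map_pyRange L ("", 0), List.foldl_map]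
  have hlen : ((L.map Prod.fst).length : Int) = PySem.List.len L := by
    simp [PySem.List.len]
  rw [hlen]
  congr 1
  apply PySem.List.foldl_congr_mem
  intro acc j hj
  have hmap : PySem.List.pyGetD (L.map Prod.fst) j "" = (PySem.List.pyGetD L j ("", 0)).1 := by
    have := PySem.List.pyGetD_map (f := Prod.fst) (xs := L) (i := j) (d := ("", 0))
    simpa using this
  rw [hmap]
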